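-- pv_equiv track=rewrite | github.com/Nyfeu/NPU | sim/core/test_array.py | prepare_os_inputs
-- ===== SOURCE A (Python) =====
-- ROWS = 4
--
-- COLS = 4
--
-- def prepare_os_inputs(matrix_act, matrix_w):
--     """
--     Prepara os streams de entrada aplicando o atraso (Skew) necessário para
--     a arquitetura Output Stationary.
--
--     Lógica Temporal:
--       Para que o elemento A[row, k] encontre B[k, col] no PE(row, col):
--       - A[row, k] deve entrar na linha 'row' no ciclo T = k + row
--       - B[k, col] deve entrar na coluna 'col' no ciclo T = k + col
--
--     Args:
--         matrix_act (list): Matriz de Ativações (Entrada Esquerda) [ROWS][K]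
--         matrix_w   (list): Matriz de Pesos (Entrada Superior) [K][COLS]
--
--     Returns:
--         tuple: (stream_acts, stream_wgts) prontos para injeção ciclo a ciclo.
--     """
--     K_DEPTH = len(matrix_act[0]) # Dimensão comum da multiplicação (k)
--
--     # O tempo total cobre a profundidade K + a latência de preenchimento do array
--     total_cycles = K_DEPTH + max(ROWS, COLS) + 5
--
--     stream_acts = []
--     stream_wgts = []
--
--     for t in range(total_cycles):
--         # Construir vetor de Ativações para o ciclo atual (Coluna Vertical na borda Esq)
--         current_act_col = []
--         for r in range(ROWS):
--             # Atraso triangular: linha 'r' atrasada por 'r' ciclos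
--             k = t - r
--             if 0 <= k < K_DEPTH:
--                 val = matrix_act[r][k]
--             else:
--                 val = 0 # Padding (Zeros)
--             current_act_col.append(val)
--         stream_acts.append(current_act_col)
--
--         # Construir vetor de Pesos para o ciclo atual (Linha Horizontal na borda Sup)
--         current_wgt_row = []
--         for c in range(COLS):
--             # Atraso triangular: coluna 'c' atrasada por 'c' ciclos
--             k = t - c
--             if 0 <= k < K_DEPTH:
--                 val = matrix_w[k][c]
--             else:
--                 val = 0 # Padding (Zeros)
--             current_wgt_row.append(val)
--         stream_wgts.append(current_wgt_row)
--
--     return stream_acts, stream_wgts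
-- ===== SOURCE B (Python) =====
-- ROWS = 4
--
-- COLS = 4
--
-- def prepare_os_inputs(matrix_act, matrix_w):
--     # Scatter formulation: pre-allocate zero-filled streams, then place each
--     # matrix element directly at its skewed cycle (no per-cycle branching).
--     K_DEPTH = len(matrix_act[0])
--     total_cycles = K_DEPTH + max(ROWS, COLS) + 5
--     stream_acts = [[0] * ROWS for _ in range(total_cycles)]
--     stream_wgts = [[0] * COLS for _ in range(total_cycles)]
--     for r in range(ROWS):
--         for k in range(K_DEPTH):
--             stream_acts[k + r][r] = matrix_act[r][k]
--     for c in range(COLS):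
--         for k in range(K_DEPTH):
--             stream_wgts[k + c][c] = matrix_w[k][c]
--     return stream_acts, stream_wgts
-- ===== Notes on version B (the rewrite author's own statement) =====
-- stated objective: alternative
-- what changed: B pre-allocates the two streams as total_cycles zero vectors and scatters each matrix element directly to its skewed cycle position, replacing A's per-cycle gather that evaluates a window test in every cell of every cycle.
import Mathlib
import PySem

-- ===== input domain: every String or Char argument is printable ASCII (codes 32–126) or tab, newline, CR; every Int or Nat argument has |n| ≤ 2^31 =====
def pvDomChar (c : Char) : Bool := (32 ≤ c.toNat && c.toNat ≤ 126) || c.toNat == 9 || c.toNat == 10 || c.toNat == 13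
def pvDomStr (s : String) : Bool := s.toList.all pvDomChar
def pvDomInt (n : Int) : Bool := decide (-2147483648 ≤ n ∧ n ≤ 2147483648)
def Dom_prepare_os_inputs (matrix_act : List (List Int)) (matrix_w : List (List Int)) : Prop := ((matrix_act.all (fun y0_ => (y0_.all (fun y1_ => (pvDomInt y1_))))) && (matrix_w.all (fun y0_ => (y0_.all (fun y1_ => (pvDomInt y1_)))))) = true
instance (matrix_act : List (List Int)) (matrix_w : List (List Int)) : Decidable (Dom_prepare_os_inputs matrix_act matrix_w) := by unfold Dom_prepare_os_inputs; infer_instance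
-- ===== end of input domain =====

-- B replaces A's per-cycle gather (a branch in every cell of every cycle) by a pre-allocated
-- zero grid filled by a position-driven scatter; objective: alternative decomposition.
-- ===== PORT A =====
-- Python cell access matrix[i][j] is ported as pyGet? with .getD; the defaults are reached
-- only outside Pre_ (where the Python raises IndexError).
def prepare_os_inputs (matrix_act : List (List Int)) (matrix_w : List (List Int)) : List (List Int) × List (List Int) :=
  let K : Nat := matrix_act.headI.length
  let total : Nat := K + max 4 4 + 5
  let stream_acts :=
    (PySem.List.pyRange 0 (total : Int) 1).map (fun t =>
      (PySem.List.pyRange 0 4 1).map (fun r =>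
        let k := t - r
        if 0 ≤ k ∧ k < (K : Int) then
          (PySem.List.pyGet? ((PySem.List.pyGet? matrix_act r).getD []) k).getD 0
        else 0))
  let stream_wgts :=
    (PySem.List.pyRange 0 (total : Int) 1).map (fun t =>
      (PySem.List.pyRange 0 4 1).map (fun c =>
        let k := t - c
        if 0 ≤ k ∧ k < (K : Int) then
          (PySem.List.pyGet? ((PySem.List.pyGet? matrix_w k).getD []) c).getD 0
        else 0))
  (stream_acts, stream_wgts)

-- ===== PORT B =====
-- stream[i][j] = v  (Source B's element assignment)
def pvSet2 (s : List (List Int)) (i j : Nat) (v : Int) : List (List Int) :=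
  s.set i ((s.getD i []).set j v)

-- Source B's scatter double loop: for lane in range(lanes): for k in range(K): s[k+lane][lane] = v lane k
def pvScatter (v : Nat → Nat → Int) (lanes K : Nat) (s : List (List Int)) : List (List Int) :=
  (List.range lanes).foldl (fun s r => (List.range K).foldl (fun s k => pvSet2 s (k + r) r (v r k)) s) s

def prepare_os_inputs_alt (matrix_act : List (List Int)) (matrix_w : List (List Int)) : List (List Int) × List (List Int) :=
  let K : Nat := matrix_act.headI.length
  let total : Nat := K + max 4 4 + 5
  let stream_acts := pvScatter
    (fun r k => (PySem.List.pyGet? ((PySem.List.pyGet? matrix_act (r : Int)).getD []) (k : Int)).getD 0)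
    4 K (List.replicate total (List.replicate 4 0))
  let stream_wgts := pvScatter
    (fun c k => (PySem.List.pyGet? ((PySem.List.pyGet? matrix_w (k : Int)).getD []) (c : Int)).getD 0)
    4 K (List.replicate total (List.replicate 4 0))
  (stream_acts, stream_wgts)

-- ===== PRECONDITION & SPEC =====
-- Pre_ excludes exactly the inputs where the Python A raises IndexError: an empty matrix_act
-- (matrix_act[0]), or — when K_DEPTH > 0 — fewer than 4 activation rows, an accessed activation
-- row shorter than K_DEPTH, fewer than K_DEPTH weight rows, or an accessed weight row shorter
-- than 4.  (B raises on exactly the same inputs.)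
def Pre_prepare_os_inputs (matrix_act : List (List Int)) (matrix_w : List (List Int)) : Prop :=
  matrix_act ≠ [] ∧ (matrix_act.headI.length = 0 ∨
    (4 ≤ matrix_act.length ∧
     (∀ row ∈ matrix_act.take 4, matrix_act.headI.length ≤ row.length) ∧
     matrix_act.headI.length ≤ matrix_w.length ∧
     (∀ row ∈ matrix_w.take matrix_act.headI.length, 4 ≤ row.length)))
instance (matrix_act : List (List Int)) (matrix_w : List (List Int)) : Decidable (Pre_prepare_os_inputs matrix_act matrix_w) := by unfold Pre_prepare_os_inputs; infer_instance

def pvWitness_prepare_os_inputs : List (List Int) × List (List Int) :=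
  ([[1, 2], [3, 4], [5, 6], [7, 8]], [[1, 2, 3, 4], [5, 6, 7, 8]])

def Spec_prepare_os_inputs (matrix_act : List (List Int)) (matrix_w : List (List Int)) (out : List (List Int) × List (List Int)) : Prop := out = prepare_os_inputs_alt matrix_act matrix_w
instance (matrix_act : List (List Int)) (matrix_w : List (List Int)) (out : List (List Int) × List (List Int)) : Decidable (Spec_prepare_os_inputs matrix_act matrix_w out) := by unfold Spec_prepare_os_inputs; infer_instance

-- ===== CLAIM (what is proved, stated in full; the proofs are below) =====
def Claim_equal_prepare_os_inputs : Prop := ∀ (matrix_act : List (List Int)) (matrix_w : List (List Int)), Dom_prepare_os_inputs matrix_act matrix_w → Pre_prepare_os_inputs matrix_act matrix_w → Spec_prepare_os_inputs matrix_act matrix_w (prepare_os_inputs matrix_act matrix_w)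

-- ===== LEMMAS AND PROOFS =====

-- cell read used only by the proofs
def pvEntry (s : List (List Int)) (i j : Nat) : Int := (s.getD i []).getD j 0

-- shape invariant: outer length T, every row length 4
def pvShape (T : Nat) (s : List (List Int)) : Prop := s.length = T ∧ ∀ l ∈ s, l.length = 4

theorem pv_getD_set_self {α : Type} {s : List α} {i : Nat} {x d : α} (hi : i < s.length) :
    (s.set i x).getD i d = x := by
  rw [List.getD_eq_getElem?_getD, List.getElem?_set_self hi]; rfl

theorem pv_getD_set_ne {α : Type} {s : List α} {i i' : Nat} {x d : α} (h : i ≠ i') :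
    (s.set i x).getD i' d = s.getD i' d := by
  rw [List.getD_eq_getElem?_getD, List.getElem?_set_ne h, ← List.getD_eq_getElem?_getD]

theorem pvShape_set2 {T : Nat} {s : List (List Int)} (h : pvShape T s) (i j : Nat) (v : Int) :
    pvShape T (pvSet2 s i j v) := by
  obtain ⟨h1, h2⟩ := h
  by_cases hi : i < s.length
  · refine ⟨by simpa [pvSet2] using h1, ?_⟩
    intro l hl
    rcases List.mem_or_eq_of_mem_set hl with hl | rfl
    · exact h2 _ hl
    · rw [List.getD_eq_getElem?_getD, List.getElem?_eq_getElem hi]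
      simpa using h2 _ (List.getElem_mem hi)
  · rw [pvSet2, List.set_eq_of_length_le (by omega)]
    exact ⟨h1, h2⟩

theorem pvShape_foldl_inner {T r : Nat} (v : Nat → Int) :
    ∀ (L : List Nat) (s : List (List Int)), pvShape T s →
      pvShape T (L.foldl (fun s k => pvSet2 s (k + r) r (v k)) s) := by
  intro L
  induction L with
  | nil => intro s hs; exact hs
  | cons a L ih => intro s hs; exact ih _ (pvShape_set2 hs _ _ _)

theorem pvShape_foldl_outer {T K : Nat} (v : Nat → Nat → Int) :
    ∀ (L : List Nat) (s : List (List Int)), pvShape T s →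
      pvShape T (L.foldl (fun s r => (List.range K).foldl (fun s k => pvSet2 s (k + r) r (v r k)) s) s) := by
  intro L
  induction L with
  | nil => intro s hs; exact hs
  | cons a L ih => intro s hs; exact ih _ (pvShape_foldl_inner (v a) _ _ hs)

theorem pvShape_getD {T : Nat} {s : List (List Int)} (h : pvShape T s) {i : Nat} (hi : i < T) :
    (s.getD i []).length = 4 := by
  obtain ⟨h1, h2⟩ := h
  rw [List.getD_eq_getElem?_getD, List.getElem?_eq_getElem (by omega)]
  simpa using h2 _ (List.getElem_mem (by omega))

theorem pvEntry_set2_self {s : List (List Int)} {i j : Nat} (v : Int)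
    (hi : i < s.length) (hj : j < (s.getD i []).length) :
    pvEntry (pvSet2 s i j v) i j = v := by
  rw [pvEntry, pvSet2, pv_getD_set_self hi, pv_getD_set_self hj]

theorem pvEntry_set2_ne {s : List (List Int)} {i j i' j' : Nat} (v : Int)
    (h : i' ≠ i ∨ j' ≠ j) :
    pvEntry (pvSet2 s i j v) i' j' = pvEntry s i' j' := by
  rcases h with h | h
  · rw [pvEntry, pvEntry, pvSet2, pv_getD_set_ne (Ne.symm h)]
  · by_cases hii : i' = i
    · subst hii
      by_cases hi : i' < s.length
      · rw [pvEntry, pvEntry, pvSet2, pv_getD_set_self hi, pv_getD_set_ne (Ne.symm h)]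
      · rw [pvSet2, List.set_eq_of_length_le (by omega)]
    · rw [pvEntry, pvEntry, pvSet2, pv_getD_set_ne (Ne.symm hii)]

theorem pvEntry_inner {T r : Nat} (v : Nat → Int) (hr : r < 4) :
    ∀ (K : Nat), K + r ≤ T → ∀ (s : List (List Int)), pvShape T s → ∀ i j, i < T → j < 4 →
      pvEntry ((List.range K).foldl (fun s k => pvSet2 s (k + r) r (v k)) s) i j
        = if j = r ∧ r ≤ i ∧ i - r < K then v (i - r) else pvEntry s i j := by
  intro K
  induction K with
  | zero => intro _ s hs i j hi hj; simp
  | succ K ih =>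
    intro hKr s hs i j hi hj
    rw [List.range_succ, List.foldl_append, List.foldl_cons, List.foldl_nil]
    have hF : pvShape T ((List.range K).foldl (fun s k => pvSet2 s (k + r) r (v k)) s) :=
      pvShape_foldl_inner v _ _ hs
    by_cases hij : i = K + r ∧ j = r
    · rw [hij.1, hij.2]
      rw [pvEntry_set2_self _ (by rw [hF.1]; omega)
        (by rw [pvShape_getD hF (show K + r < T by omega)]; omega)]
      rw [if_pos ⟨rfl, by omega, by omega⟩]
      congr 1
      omega
    · rw [pvEntry_set2_ne _ (by omega), ih (by omega) s hs i j hi hj]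
      split_ifs <;> first | rfl | omega

theorem pvEntry_scatter {T K : Nat} (v : Nat → Nat → Int) (hK : K + 4 ≤ T) :
    ∀ (R : Nat), R ≤ 4 → ∀ (s : List (List Int)), pvShape T s → ∀ i j, i < T → j < 4 →
      pvEntry ((List.range R).foldl
          (fun s r => (List.range K).foldl (fun s k => pvSet2 s (k + r) r (v r k)) s) s) i j
        = if j < R ∧ j ≤ i ∧ i - j < K then v j (i - j) else pvEntry s i j := by
  intro R
  induction R with
  | zero => intro _ s hs i j hi hj; simp
  | succ R ih =>
    intro hR s hs i j hi hj
    rw [List.range_succ, List.foldl_append, List.foldl_cons, List.foldl_nil]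
    have hG : pvShape T ((List.range R).foldl
        (fun s r => (List.range K).foldl (fun s k => pvSet2 s (k + r) r (v r k)) s) s) :=
      pvShape_foldl_outer v _ _ hs
    rw [pvEntry_inner (v R) (by omega) K (by omega) _ hG i j hi hj,
      ih (by omega) s hs i j hi hj]
    by_cases hjR : j = R
    · subst hjR; split_ifs <;> first | rfl | omega
    · split_ifs <;> first | rfl | omega

theorem pvEntry_replicate (T i j : Nat) :
    pvEntry (List.replicate T (List.replicate 4 (0 : Int))) i j = 0 := by
  unfold pvEntry
  by_cases hi : i < T
  · rw [List.getD_replicate _ hi]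
    by_cases hj : j < 4
    · rw [List.getD_replicate _ hj]
    · rw [List.getD_eq_getElem?_getD, List.getElem?_eq_none (by simpa using hj)]
      rfl
  · rw [List.getD_eq_getElem?_getD (l := List.replicate T (List.replicate 4 (0 : Int))),
      List.getElem?_eq_none (by simpa using hi)]
    rfl

theorem pvScatter_eq_map {T K : Nat} (v : Nat → Nat → Int) (hK : K + 4 ≤ T) :
    pvScatter v 4 K (List.replicate T (List.replicate 4 0)) =
      (List.range T).map (fun i => (List.range 4).map
        (fun j => if j ≤ i ∧ i - j < K then v j (i - j) else 0)) := by
  unfold pvScatter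
  have hs0 : pvShape T (List.replicate T (List.replicate 4 0)) :=
    ⟨by simp, by intro l hl; rw [List.eq_of_mem_replicate hl]; simp⟩
  have hS : pvShape T ((List.range 4).foldl
      (fun s r => (List.range K).foldl (fun s k => pvSet2 s (k + r) r (v r k)) s)
      (List.replicate T (List.replicate 4 0))) :=
    pvShape_foldl_outer v _ _ hs0
  apply List.ext_getElem
  · rw [hS.1, List.length_map, List.length_range]
  · intro i h1 h2
    have hi : i < T := by rw [← hS.1]; exact h1
    apply List.ext_getElem
    · rw [List.getElem_map, hS.2 _ (List.getElem_mem h1), List.length_map, List.length_range]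
    · intro j hj1 hj2
      have hj : j < 4 := by
        have := hS.2 _ (List.getElem_mem h1); omega
      have e1 : pvEntry ((List.range 4).foldl
          (fun s r => (List.range K).foldl (fun s k => pvSet2 s (k + r) r (v r k)) s)
          (List.replicate T (List.replicate 4 0))) i j
          = ((List.range 4).foldl
          (fun s r => (List.range K).foldl (fun s k => pvSet2 s (k + r) r (v r k)) s)
          (List.replicate T (List.replicate 4 0)))[i][j] := by
        unfold pvEntry
        rw [List.getD_eq_getElem _ _ h1, List.getD_eq_getElem _ _ hj1]
      rw [← e1, pvEntry_scatter v hK 4 (le_refl 4) _ hs0 i j hi hj, pvEntry_replicate]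
      simp only [List.getElem_map, List.getElem_range]
      split_ifs <;> first | rfl | omega

theorem pvCell_eq (f : Int → Int → Int) (K n j : Nat) :
    (if 0 ≤ (n : Int) - (j : Int) ∧ (n : Int) - (j : Int) < (K : Int)
      then f j ((n : Int) - (j : Int)) else 0)
    = (if j ≤ n ∧ n - j < K then f j ((n - j : Nat) : Int) else 0) := by
  by_cases h : j ≤ n ∧ n - j < K
  · have he : (n : Int) - (j : Int) = ((n - j : Nat) : Int) := by omega
    rw [he, if_pos (by constructor <;> omega), if_pos h]
  · rw [if_neg (by omega), if_neg h]

theorem pvStream_eq (T K : Nat) (hK : K + 4 ≤ T) (f : Int → Int → Int) :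
    (PySem.List.pyRange 0 (T : Int) 1).map (fun t =>
      (PySem.List.pyRange 0 4 1).map (fun r =>
        if 0 ≤ t - r ∧ t - r < (K : Int) then f r (t - r) else 0))
    = pvScatter (fun r k => f (r : Int) (k : Int)) 4 K (List.replicate T (List.replicate 4 0)) := by
  rw [pvScatter_eq_map _ hK]
  rw [show (4 : Int) = ((4 : Nat) : Int) from rfl, PySem.List.pyRange_zero_natCast,
    PySem.List.pyRange_zero_natCast, List.map_map]
  apply List.map_congr_left
  intro n hn
  simp only [Function.comp_apply]
  rw [List.map_map]
  apply List.map_congr_left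
  intro j hj
  simp only [Function.comp_apply]
  exact pvCell_eq f K n j

theorem pvPorts_eq (matrix_act matrix_w : List (List Int)) :
    prepare_os_inputs matrix_act matrix_w = prepare_os_inputs_alt matrix_act matrix_w := by
  unfold prepare_os_inputs prepare_os_inputs_alt
  have hK : matrix_act.headI.length + 4 ≤ matrix_act.headI.length + max 4 4 + 5 := by omega
  refine congrArg₂ Prod.mk ?_ ?_
  · exact pvStream_eq _ _ hK
      (fun r k => (PySem.List.pyGet? ((PySem.List.pyGet? matrix_act r).getD []) k).getD 0)
  · exact pvStream_eq _ _ hK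
      (fun c k => (PySem.List.pyGet? ((PySem.List.pyGet? matrix_w k).getD []) c).getD 0)

-- ===== VERDICT (by name: the statement is the Claim_ definition above) =====
theorem prepare_os_inputs_spec : Claim_equal_prepare_os_inputs := by
  intro matrix_act matrix_w _ _
  unfold Spec_prepare_os_inputs
  exact pvPorts_eq matrix_act matrix_w
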